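-- pv_equiv track=rewrite | github.com/Ayush-Tiwari1/DSA | Days.41/1.Identical-Sentences.py | IdenticalSentences
-- ===== SOURCE A (Python) =====
-- def Find(u,parent):
--     if parent[u]==-1:
--         return u
--     parent[u]=Find(parent[u],parent)
--     return parent[u]
--
-- def Union(x,y,rank,parent):
--     if rank[x]>rank[y]:
--         parent[y]=x
--     elif rank[x]<rank[y]:
--         parent[x]=y
--     else:
--         parent[y]=x
--         rank[x]+=1
--
-- def IdenticalSentences(n,m,p,word1,word2,pairs):
--     if n!=m:
--         return False
--     StringId={}
--     IdString={}
--     uid=0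
--     for u,v in pairs:
--         if u not in StringId:
--             StringId[u]=uid
--             IdString[uid]=u
--             uid+=1
--         if v not in StringId:
--             StringId[v]=uid
--             IdString[uid]=v
--             uid+=1
--     parent=[-1 for i in range(uid)]
--     rank=[0 for i in range(uid)]
--     for u,v in pairs:
--         x=Find(StringId[u],parent)
--         y=Find(StringId[v],parent)
--         if x!=y:
--             Union(x,y,rank,parent)
--     for i in range(n):
--         if word1[i]==word2[i]:
--             continue
--         if word1[i] not in StringId or word2[i] not in StringId:
--             return False
--         x=Find(StringId[word1[i]],parent)
--         y=Find(StringId[word2[i]],parent)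
--         if x!=y:
--             return False
--     return True
-- ===== SOURCE B (Python) =====
-- def IdenticalSentences(n, m, p, word1, word2, pairs):
--     if n != m:
--         return False
--     # label propagation: comp maps each word seen in pairs to its class label
--     comp = {}
--     for u, v in pairs:
--         ru = comp.setdefault(u, u)
--         rv = comp.setdefault(v, v)
--         if ru != rv:
--             for k in comp:
--                 if comp[k] == rv:
--                     comp[k] = ru
--     for i in range(n):
--         a, b = word1[i], word2[i]
--         if a == b:
--             continue
--         if a not in comp or b not in comp:
--             return False
--         if comp[a] != comp[b]:
--             return False
--     return True
-- ===== Notes on version B (the rewrite author's own statement) =====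
-- stated objective: simpler
-- what changed: Replaces the union-find (Find with path compression, Union by rank, string-to-id tables) with a single dict mapping each pair-word to a class label, merging two classes by relabelling values in place; the n!=m check, the node set drawn only from pairs, and the per-index comparison order are kept.
-- outside the precondition, e.g. on IdenticalSentences(2, 2, 0, ['a'], ['b'], []): A returns False, B returns False
import Mathlib
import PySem

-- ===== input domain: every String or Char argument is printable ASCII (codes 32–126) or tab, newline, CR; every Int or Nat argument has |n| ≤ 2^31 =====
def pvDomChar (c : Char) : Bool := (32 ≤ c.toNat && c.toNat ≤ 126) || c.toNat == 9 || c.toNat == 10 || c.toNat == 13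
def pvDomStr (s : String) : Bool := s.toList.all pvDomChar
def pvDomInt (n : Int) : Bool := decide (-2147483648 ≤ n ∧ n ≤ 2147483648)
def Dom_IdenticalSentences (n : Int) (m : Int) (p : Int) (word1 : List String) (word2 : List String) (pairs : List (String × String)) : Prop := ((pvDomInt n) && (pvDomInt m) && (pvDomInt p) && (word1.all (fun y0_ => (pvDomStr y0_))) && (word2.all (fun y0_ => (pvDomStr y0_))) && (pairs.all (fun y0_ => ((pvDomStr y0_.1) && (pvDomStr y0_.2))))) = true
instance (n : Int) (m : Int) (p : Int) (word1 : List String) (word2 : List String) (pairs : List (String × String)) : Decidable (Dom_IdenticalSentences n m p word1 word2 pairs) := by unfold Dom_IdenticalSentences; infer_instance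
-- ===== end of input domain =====

-- Header: B replaces A's union-find with a single label dict merged by relabelling (simpler);
-- equal return values are proved on Pre_ (A raises IndexError when n = m exceeds a word list's length).

-- ===== PORT A =====
-- builds StringId / IdString / uid from pairs (IdString is written and never read, as in A)
def pvBuildIds : List (String × String) → PySem.Dict String Int → PySem.Dict Int String → Int →
    PySem.Dict String Int × PySem.Dict Int String × Int
  | [], sid, ids, uid => (sid, ids, uid)
  | (u, v) :: rest, sid, ids, uid =>
    let s1 := if sid.contains u then (sid, ids, uid) else (sid.insert u uid, ids.insert uid u, uid + 1)
    let s2 := if s1.1.contains v then s1 else (s1.1.insert v s1.2.2, s1.2.1.insert s1.2.2 v, s1.2.2 + 1)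
    pvBuildIds rest s2.1 s2.2.1 s2.2.2

-- Find(u, parent) with path compression; fuel (= len(parent) at call sites) only makes the
-- recursion structural — it is never exhausted on states A reaches (proved via the forest invariant).
def pvFind : Nat → Int → List Int → Int × List Int
  | 0, u, parent => (u, parent)
  | fuel + 1, u, parent =>
    let pu := PySem.List.pyGetD parent u (-1)
    if pu = -1 then (u, parent)
    else
      let rp := pvFind fuel pu parent
      (rp.1, PySem.List.pySetD rp.2 u rp.1)

-- Union(x, y, rank, parent); returns (rank, parent)
def pvUnion (x y : Int) (rank parent : List Int) : List Int × List Int :=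
  if PySem.List.pyGetD rank x 0 > PySem.List.pyGetD rank y 0 then (rank, PySem.List.pySetD parent y x)
  else if PySem.List.pyGetD rank x 0 < PySem.List.pyGetD rank y 0 then (rank, PySem.List.pySetD parent x y)
  else ((PySem.List.pySetD rank x (PySem.List.pyGetD rank x 0 + 1)), PySem.List.pySetD parent y x)

-- the 'for u,v in pairs' union loop; state (parent, rank)
def pvUnionPairs (sid : PySem.Dict String Int) : List (String × String) → List Int → List Int → List Int × List Int
  | [], parent, rank => (parent, rank)
  | (u, v) :: rest, parent, rank =>
    let xp := pvFind parent.length ((sid.get? u).getD (-1)) parent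
    let yp := pvFind xp.2.length ((sid.get? v).getD (-1)) xp.2
    if xp.1 ≠ yp.1 then
      let rp := pvUnion xp.1 yp.1 rank yp.2
      pvUnionPairs sid rest rp.2 rp.1
    else pvUnionPairs sid rest yp.2 rank

-- the 'for i in range(n)' check loop of A (word accesses total via getD; Pre_ keeps i in range)
def pvCheckA (sid : PySem.Dict String Int) : List Int → List Int → List String → List String → Bool
  | _, [], _, _ => true
  | parent, i :: rest, w1, w2 =>
    let a := PySem.List.pyGetD w1 i ""
    let b := PySem.List.pyGetD w2 i ""
    if a = b then pvCheckA sid parent rest w1 w2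
    else if !(sid.contains a) || !(sid.contains b) then false
    else
      let xp := pvFind parent.length ((sid.get? a).getD (-1)) parent
      let yp := pvFind xp.2.length ((sid.get? b).getD (-1)) xp.2
      if xp.1 ≠ yp.1 then false else pvCheckA sid yp.2 rest w1 w2

def IdenticalSentences (n : Int) (m : Int) (p : Int) (word1 : List String) (word2 : List String) (pairs : List (String × String)) : Bool :=
  if n ≠ m then false
  else
    let b := pvBuildIds pairs PySem.Dict.empty PySem.Dict.empty 0
    let parent : List Int := List.replicate b.2.2.toNat (-1)
    let rank : List Int := List.replicate b.2.2.toNat 0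
    let pr := pvUnionPairs b.1 pairs parent rank
    pvCheckA b.1 pr.1 (PySem.List.pyRange 0 n 1) word1 word2

-- ===== PORT B =====
-- one pair: setdefault both words, then relabel the whole rv-class to ru
def pvCompStep (comp : PySem.Dict String String) (uv : String × String) : PySem.Dict String String :=
  let c1 := comp.setdefault uv.1 uv.1
  let c2 := c1.setdefault uv.2 uv.2
  let ru := c2.getD uv.1 uv.1
  let rv := c2.getD uv.2 uv.2
  if ru ≠ rv then
    PySem.Dict.mk (c2.items.map (fun kv => if kv.2 = rv then (kv.1, ru) else kv))
  else c2

-- the 'for i in range(n)' check loop of B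
def pvCheckB (comp : PySem.Dict String String) : List Int → List String → List String → Bool
  | [], _, _ => true
  | i :: rest, w1, w2 =>
    let a := PySem.List.pyGetD w1 i ""
    let b := PySem.List.pyGetD w2 i ""
    if a = b then pvCheckB comp rest w1 w2
    else if !(comp.contains a) || !(comp.contains b) then false
    else if comp.getD a a ≠ comp.getD b b then false
    else pvCheckB comp rest w1 w2

def IdenticalSentences_alt (n : Int) (m : Int) (p : Int) (word1 : List String) (word2 : List String) (pairs : List (String × String)) : Bool :=
  if n ≠ m then false
  else
    let comp := pairs.foldl pvCompStep PySem.Dict.empty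
    pvCheckB comp (PySem.List.pyRange 0 n 1) word1 word2

-- ===== PRECONDITION & SPEC =====
-- Pre_ excludes the inputs where n = m exceeds a word list's length: there A raises IndexError at the
-- out-of-range index, except when an earlier mismatching index already made it return False (B returns
-- False there too, see the cite).
def Pre_IdenticalSentences (n : Int) (m : Int) (p : Int) (word1 : List String) (word2 : List String) (pairs : List (String × String)) : Prop :=
  n = m → (n ≤ (word1.length : Int) ∧ n ≤ (word2.length : Int))
instance (n : Int) (m : Int) (p : Int) (word1 : List String) (word2 : List String) (pairs : List (String × String)) : Decidable (Pre_IdenticalSentences n m p word1 word2 pairs) := by unfold Pre_IdenticalSentences; infer_instance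

def pvWitness_IdenticalSentences : Int × Int × Int × List String × List String × (List (String × String)) :=
  (2, 2, 1, ["great", "acting"], ["fine", "acting"], [("great", "fine")])

def Spec_IdenticalSentences (n : Int) (m : Int) (p : Int) (word1 : List String) (word2 : List String) (pairs : List (String × String)) (out : Bool) : Prop := out = IdenticalSentences_alt n m p word1 word2 pairs
instance (n : Int) (m : Int) (p : Int) (word1 : List String) (word2 : List String) (pairs : List (String × String)) (out : Bool) : Decidable (Spec_IdenticalSentences n m p word1 word2 pairs out) := by unfold Spec_IdenticalSentences; infer_instance

-- ===== CLAIM (what is proved, stated in full; the proofs are below) =====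
def Claim_equal_IdenticalSentences : Prop := ∀ (n : Int) (m : Int) (p : Int) (word1 : List String) (word2 : List String) (pairs : List (String × String)), Dom_IdenticalSentences n m p word1 word2 pairs → Pre_IdenticalSentences n m p word1 word2 pairs → Spec_IdenticalSentences n m p word1 word2 pairs (IdenticalSentences n m p word1 word2 pairs)

-- ===== LEMMAS AND PROOFS =====

def pvGetP (p : List Int) (u : Int) : Int := p.getD u.toNat (-1)
def pvValid (p : List Int) (u : Int) : Prop := 0 ≤ u ∧ u.toNat < p.length

inductive pvRootN (p : List Int) : Int → Nat → Int → Prop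
  | self (u : Int) : pvGetP p u = -1 → pvRootN p u 0 u
  | step (u : Int) (k : Nat) (r : Int) : pvGetP p u ≠ -1 → pvRootN p (pvGetP p u) k r → pvRootN p u (k + 1) r

def pvRoot (p : List Int) (u r : Int) : Prop := ∃ k, pvRootN p u k r
def pvREq (p : List Int) (a b : Int) : Prop := ∃ r, pvRoot p a r ∧ pvRoot p b r
def pvBnd (p : List Int) : Prop := ∀ u, pvValid p u → pvGetP p u = -1 ∨ pvValid p (pvGetP p u)
def pvTerm (p : List Int) : Prop := ∀ u, pvValid p u → ∃ r, pvRoot p u r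

theorem pvGetP_set_self (p : List Int) (x y : Int) (h : y.toNat < p.length) :
    pvGetP (p.set y.toNat x) y = x := by simp [pvGetP, List.getD, h]

theorem pvGetP_set_ne (p : List Int) (x y w : Int) (h : w.toNat ≠ y.toNat) :
    pvGetP (p.set y.toNat x) w = pvGetP p w := by
  simp [pvGetP, List.getD, Ne.symm h]

theorem pvRootN_fun {p : List Int} {u : Int} {k k' : Nat} {r r' : Int}
    (h1 : pvRootN p u k r) (h2 : pvRootN p u k' r') : k = k' ∧ r = r' := by
  induction h1 generalizing k' with
  | self u hu => cases h2 with
    | self => exact ⟨rfl, rfl⟩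
    | step _ _ _ hne => exact absurd hu hne
  | step u k r hne hsub ih => cases h2 with
    | self _ hu => exact absurd hu hne
    | step _ k2 _ _ hsub2 => obtain ⟨hk, hr⟩ := ih hsub2; exact ⟨by omega, hr⟩

theorem pvRoot_fun {p : List Int} {u r r' : Int} (h1 : pvRoot p u r) (h2 : pvRoot p u r') : r = r' := by
  obtain ⟨k, h1⟩ := h1; obtain ⟨k', h2⟩ := h2; exact (pvRootN_fun h1 h2).2

theorem pvRootN_flat {p : List Int} {u : Int} {k : Nat} {r : Int} (h : pvRootN p u k r) :
    pvGetP p r = -1 := by induction h with | self _ hu => exact hu | step => assumption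

theorem pvRoot_flat {p : List Int} {u r : Int} (h : pvRoot p u r) : pvGetP p r = -1 := by
  obtain ⟨k, h⟩ := h; exact pvRootN_flat h

theorem pvRoot_valid {p : List Int} {u r : Int} (hb : pvBnd p) (hv : pvValid p u)
    (h : pvRoot p u r) : pvValid p r := by
  obtain ⟨k, h⟩ := h
  induction h with
  | self => exact hv
  | step u k r hne hsub ih =>
      rcases hb u hv with h1 | h1
      · exact absurd h1 hne
      · exact ih h1

theorem pvRootN_chain {p : List Int} {u : Int} {k : Nat} {r : Int} (hb : pvBnd p)
    (h : pvRootN p u k r) (hv : pvValid p u) :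
    ∃ cs : List Int, cs.length = k + 1 ∧ cs.Nodup ∧ (∀ x ∈ cs, pvValid p x) ∧
      (∀ x ∈ cs, ∃ k' ≤ k, pvRootN p x k' r) := by
  induction h with
  | self u hu =>
      refine ⟨[u], rfl, by simp, by simpa using hv, ?_⟩
      intro x hx
      simp only [List.mem_singleton] at hx
      subst hx
      exact ⟨0, le_refl _, pvRootN.self _ hu⟩
  | step u k r hne hsub ih =>
      rcases hb u hv with h1 | h1
      · exact absurd h1 hne
      · obtain ⟨cs, hlen, hnd, hval, hroots⟩ := ih h1
        refine ⟨u :: cs, by simp [hlen], ?_, ?_, ?_⟩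
        · refine List.nodup_cons.mpr ⟨?_, hnd⟩
          intro hmem
          obtain ⟨k', hk', hr'⟩ := hroots u hmem
          have := pvRootN_fun hr' (pvRootN.step u k r hne hsub)
          omega
        · intro x hx
          rcases List.mem_cons.mp hx with hx | hx
          · exact hx ▸ hv
          · exact hval x hx
        · intro x hx
          rcases List.mem_cons.mp hx with hx | hx
          · exact hx ▸ ⟨k + 1, le_refl _, pvRootN.step u k r hne hsub⟩
          · obtain ⟨k', hk', hr'⟩ := hroots x hx; exact ⟨k', by omega, hr'⟩

theorem pvRootN_depth {p : List Int} {u : Int} {k : Nat} {r : Int} (hb : pvBnd p)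
    (h : pvRootN p u k r) (hv : pvValid p u) : k < p.length := by
  obtain ⟨cs, hlen, hnd, hval, -⟩ := pvRootN_chain hb h hv
  have hsub : cs.map Int.toNat ⊆ List.range p.length := by
    intro x hx
    simp only [List.mem_map] at hx
    obtain ⟨y, hy, rfl⟩ := hx
    exact List.mem_range.mpr (hval y hy).2
  have hnd' : (cs.map Int.toNat).Nodup := by
    refine List.Nodup.map_on ?_ hnd
    intro a ha b hb' hab
    have := (hval a ha).1; have := (hval b hb').1
    omega
  have h1 : (cs.map Int.toNat).toFinset.card = (cs.map Int.toNat).length := List.toFinset_card_of_nodup hnd'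
  have h2 : (cs.map Int.toNat).toFinset ⊆ (List.range p.length).toFinset := by
    intro x hx; simp only [List.mem_toFinset] at *; exact hsub hx
  have h3 := Finset.card_le_card h2
  have h4 : (List.range p.length).toFinset.card ≤ (List.range p.length).length := (List.range p.length).toFinset_card_le
  simp only [List.length_map, List.length_range] at h1 h3 h4
  omega

theorem pvGetP_oor {p : List Int} {w : Int} (h : p.length ≤ w.toNat) : pvGetP p w = -1 := by
  simp [pvGetP, List.getD, List.getElem?_eq_none h]

theorem pvValid_of_getP_ne {p : List Int} {w : Int} (h0 : 0 ≤ w) (h : pvGetP p w ≠ -1) :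
    pvValid p w := by
  refine ⟨h0, ?_⟩
  by_contra hlen
  exact h (pvGetP_oor (by omega))

theorem pvRoot_self_of_flat {p : List Int} {u z : Int} (hflat : pvGetP p u = -1)
    (h : pvRoot p u z) : z = u := by
  exact pvRoot_fun h ⟨0, pvRootN.self u hflat⟩

theorem pvCompress_spec (p : List Int) (u r : Int) (hb : pvBnd p) (hv : pvValid p u)
    (hr : pvRoot p u r) (hur : u ≠ r) :
    pvBnd (p.set u.toNat r) ∧ ∀ w z, 0 ≤ w → (pvRoot (p.set u.toNat r) w z ↔ pvRoot p w z) := by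
  have hrv : pvValid p r := pvRoot_valid hb hv hr
  have hrflat : pvGetP p r = -1 := pvRoot_flat hr
  have hturn : r.toNat ≠ u.toNat := by
    intro h; exact hur (by have := hrv.1; have := hv.1; omega : u = r)
  have hself : pvGetP (p.set u.toNat r) u = r := pvGetP_set_self p r u hv.2
  have hbnd : pvBnd (p.set u.toNat r) := by
    intro w hw
    have hw' : pvValid p w := by rwa [pvValid, List.length_set] at hw
    by_cases hwu : w.toNat = u.toNat
    · have hwu' : w = u := by have := hw'.1; have := hv.1; omega
      subst hwu'
      right
      rw [hself]
      exact ⟨hrv.1, by simpa [List.length_set] using hrv.2⟩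
    · rw [pvGetP_set_ne p r u w hwu]
      rcases hb w hw' with h | h
      · exact Or.inl h
      · exact Or.inr ⟨h.1, by simpa [List.length_set] using h.2⟩
  have fwd : ∀ w k z, pvRootN (p.set u.toNat r) w k z → 0 ≤ w → pvRoot p w z := by
    intro w k z hk
    induction hk with
    | self w' hw' =>
        intro h0
        by_cases hwu : w'.toNat = u.toNat
        · have : w' = u := by have := hv.1; omega
          subst this
          rw [hself] at hw'
          exact absurd hw' (by have := hrv.1; omega)
        · rw [pvGetP_set_ne p r u w' hwu] at hw'
          exact ⟨0, pvRootN.self w' hw'⟩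
    | step w' k' z' hne hsub ih =>
        intro h0
        have hwv' : pvValid (p.set u.toNat r) w' := pvValid_of_getP_ne h0 hne
        have hnext0 : 0 ≤ pvGetP (p.set u.toNat r) w' := by
          rcases hbnd w' hwv' with h | h
          · exact absurd h hne
          · exact h.1
        by_cases hwu : w'.toNat = u.toNat
        · have hwu' : w' = u := by have := hv.1; omega
          subst hwu'
          rw [hself] at hsub ih hnext0
          have hz : pvRoot p r z' := ih hnext0
          have : z' = r := pvRoot_self_of_flat hrflat hz
          subst this
          exact hr
        · rw [pvGetP_set_ne p r u w' hwu] at hne hsub ih hnext0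
          obtain ⟨kk, hkk⟩ := ih hnext0
          exact ⟨kk + 1, pvRootN.step w' kk z' hne hkk⟩
  have bwd : ∀ w k z, pvRootN p w k z → 0 ≤ w → pvRoot (p.set u.toNat r) w z := by
    intro w k z hk
    induction hk with
    | self w' hw' =>
        intro h0
        by_cases hwu : w'.toNat = u.toNat
        · have hwu' : w' = u := by have := hv.1; omega
          rw [hwu'] at hw'
          exact absurd (pvRoot_self_of_flat hw' hr).symm hur
        · rw [← pvGetP_set_ne p r u w' hwu] at hw'
          exact ⟨0, pvRootN.self w' hw'⟩
    | step w' k' z' hne hsub ih =>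
        intro h0
        have hwv : pvValid p w' := pvValid_of_getP_ne h0 hne
        have hnext0 : 0 ≤ pvGetP p w' := by
          rcases hb w' hwv with h | h
          · exact absurd h hne
          · exact h.1
        by_cases hwu : w'.toNat = u.toNat
        · have hwu' : w' = u := by have := hv.1; omega
          rw [hwu'] at hne hsub ⊢
          have hz : z' = r := pvRoot_fun ⟨k' + 1, pvRootN.step u k' z' hne hsub⟩ hr
          subst hz
          refine ⟨1, pvRootN.step u 0 z' ?_ ?_⟩
          · rw [hself]; have := hrv.1; omega
          · rw [hself]
            exact pvRootN.self z' (by rw [pvGetP_set_ne p z' u z' hturn]; exact hrflat)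
        · obtain ⟨kk, hkk⟩ := ih hnext0
          refine ⟨kk + 1, pvRootN.step w' kk z' ?_ ?_⟩
          · rw [pvGetP_set_ne p r u w' hwu]; exact hne
          · rw [pvGetP_set_ne p r u w' hwu]; exact hkk
  refine ⟨hbnd, fun w z h0 => ⟨?_, ?_⟩⟩
  · rintro ⟨k, hk⟩; exact fwd w k z hk h0
  · rintro ⟨k, hk⟩; exact bwd w k z hk h0

theorem pvLink_spec (p : List Int) (x y : Int) (hb : pvBnd p) (hx : pvValid p x) (hy : pvValid p y)
    (hfx : pvGetP p x = -1) (hfy : pvGetP p y = -1) (hne : x ≠ y) :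
    pvBnd (p.set y.toNat x) ∧
    ∀ w z, 0 ≤ w →
      (pvRoot (p.set y.toNat x) w z ↔ ∃ r, pvRoot p w r ∧ z = if r = y then x else r) := by
  have hturn : x.toNat ≠ y.toNat := by intro h; exact hne (by have := hx.1; have := hy.1; omega)
  have hself : pvGetP (p.set y.toNat x) y = x := pvGetP_set_self p x y hy.2
  have hxq : pvGetP (p.set y.toNat x) x = -1 := by
    rw [pvGetP_set_ne p x y x hturn]; exact hfx
  have hbnd : pvBnd (p.set y.toNat x) := by
    intro w hw
    have hw' : pvValid p w := by rwa [pvValid, List.length_set] at hw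
    by_cases hwy : w.toNat = y.toNat
    · have hwy' : w = y := by have := hw'.1; have := hy.1; omega
      subst hwy'
      right; rw [hself]
      exact ⟨hx.1, by simpa [List.length_set] using hx.2⟩
    · rw [pvGetP_set_ne p x y w hwy]
      rcases hb w hw' with h | h
      · exact Or.inl h
      · exact Or.inr ⟨h.1, by simpa [List.length_set] using h.2⟩
  have fwd : ∀ w k z, pvRootN (p.set y.toNat x) w k z → 0 ≤ w →
      ∃ r, pvRoot p w r ∧ z = if r = y then x else r := by
    intro w k z hk
    induction hk with
    | self w' hw' =>
        intro h0
        by_cases hwy : w'.toNat = y.toNat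
        · have hwy' : w' = y := by have := hy.1; omega
          rw [hwy'] at hw'
          rw [hself] at hw'
          exact absurd hw' (by have := hx.1; omega)
        · rw [pvGetP_set_ne p x y w' hwy] at hw'
          refine ⟨w', ⟨0, pvRootN.self w' hw'⟩, ?_⟩
          have hwny : w' ≠ y := by intro h; exact hwy (by rw [h])
          simp [hwny]
    | step w' k' z' hne' hsub ih =>
        intro h0
        have hwv' : pvValid (p.set y.toNat x) w' := pvValid_of_getP_ne h0 hne'
        have hnext0 : 0 ≤ pvGetP (p.set y.toNat x) w' := by
          rcases hbnd w' hwv' with h | h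
          · exact absurd h hne'
          · exact h.1
        by_cases hwy : w'.toNat = y.toNat
        · have hwy' : w' = y := by have := hy.1; omega
          rw [hwy'] at hsub ih ⊢
          rw [hself] at hsub ih
          obtain ⟨r, hr, hz⟩ := ih hx.1
          have hrx : r = x := pvRoot_self_of_flat hfx hr
          subst hrx
          refine ⟨y, ⟨0, pvRootN.self y hfy⟩, ?_⟩
          simp [hz]
        · rw [pvGetP_set_ne p x y w' hwy] at hne' hsub ih hnext0
          obtain ⟨r, hr, hz⟩ := ih hnext0
          obtain ⟨kk, hkk⟩ := hr
          exact ⟨r, ⟨kk + 1, pvRootN.step w' kk r hne' hkk⟩, hz⟩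
  have bwd : ∀ w k r, pvRootN p w k r → 0 ≤ w →
      pvRoot (p.set y.toNat x) w (if r = y then x else r) := by
    intro w k r hk
    induction hk with
    | self w' hw' =>
        intro h0
        by_cases hwy : w' = y
        · subst hwy
          simp only [if_pos rfl]
          exact ⟨1, pvRootN.step w' 0 x (by rw [hself]; have := hx.1; omega)
            (by rw [hself]; exact pvRootN.self x hxq)⟩
        · have hwy' : w'.toNat ≠ y.toNat := by have := hy.1; omega
          rw [if_neg hwy]
          exact ⟨0, pvRootN.self w' (by rw [pvGetP_set_ne p x y w' hwy']; exact hw')⟩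
    | step w' k' r' hne' hsub ih =>
        intro h0
        have hwv : pvValid p w' := pvValid_of_getP_ne h0 hne'
        have hnext0 : 0 ≤ pvGetP p w' := by
          rcases hb w' hwv with h | h
          · exact absurd h hne'
          · exact h.1
        have hwy : w' ≠ y := by
          intro h; rw [h] at hne'; exact hne' hfy
        have hwy' : w'.toNat ≠ y.toNat := by have := hwv.1; have := hy.1; omega
        obtain ⟨kk, hkk⟩ := ih hnext0
        refine ⟨kk + 1, pvRootN.step w' kk _ ?_ ?_⟩
        · rw [pvGetP_set_ne p x y w' hwy']; exact hne'
        · rw [pvGetP_set_ne p x y w' hwy']; exact hkk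
  refine ⟨hbnd, fun w z h0 => ⟨?_, ?_⟩⟩
  · rintro ⟨k, hk⟩; exact fwd w k z hk h0
  · rintro ⟨r, ⟨k, hk⟩, hz⟩; exact hz ▸ bwd w k r hk h0

theorem pvFind_spec (fuel : Nat) (p : List Int) (u r : Int) (k : Nat)
    (hb : pvBnd p) (hr : pvRootN p u k r) (hf : k < fuel) :
    pvValid p u →
    (pvFind fuel u p).1 = r ∧ (pvFind fuel u p).2.length = p.length ∧
    pvBnd (pvFind fuel u p).2 ∧
    (∀ w z, 0 ≤ w → (pvRoot (pvFind fuel u p).2 w z ↔ pvRoot p w z)) := by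
  induction hr generalizing fuel with
  | self u hu =>
      intro hv
      obtain ⟨f, rfl⟩ : ∃ f, fuel = f + 1 := ⟨fuel - 1, by omega⟩
      simp only [pvFind, PySem.List.pyGetD_of_nonneg _ _ hv.1]
      rw [show p.getD u.toNat (-1) = pvGetP p u from rfl, hu]
      refine ⟨by simp, by simp, by simpa using hb, by simp⟩
  | step u k r hne hsub ih =>
      intro hv
      obtain ⟨f, rfl⟩ : ∃ f, fuel = f + 1 := ⟨fuel - 1, by omega⟩
      have hpu0 : pvValid p (pvGetP p u) := by
        rcases hb u hv with h | h
        · exact absurd h hne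
        · exact h
      have ihf := ih f (by omega) hpu0
      simp only [pvFind, PySem.List.pyGetD_of_nonneg _ _ hv.1]
      rw [show p.getD u.toNat (-1) = pvGetP p u from rfl]
      rw [if_neg hne]
      obtain ⟨h1, h2, h3, h4⟩ := ihf
      set q := (pvFind f (pvGetP p u) p).2 with hq
      have hur : u ≠ r := by
        intro h
        have := pvRootN_flat hsub
        rw [← h] at this
        exact hne this
      have hvq : pvValid q u := ⟨hv.1, by rw [h2]; exact hv.2⟩
      have hrq : pvRoot q u r := (h4 u r hv.1).mpr ⟨k + 1, pvRootN.step u k r hne hsub⟩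
      have hcomp := pvCompress_spec q u r h3 hvq hrq hur
      simp only [PySem.List.pySetD_of_nonneg _ _ hv.1, h1]
      refine ⟨trivial, by simp [List.length_set, h2], hcomp.1, ?_⟩
      intro w z h0
      rw [hcomp.2 w z h0, h4 w z h0]

def pvClassOf (c : PySem.Dict String String) (w : String) : String := c.getD w w
def pvRelabel (c : PySem.Dict String String) (ru rv : String) : PySem.Dict String String :=
  PySem.Dict.mk (c.items.map (fun kv => if kv.2 = rv then (kv.1, ru) else kv))

theorem pvClassOf_setdefault (c : PySem.Dict String String) (k w : String) :
    pvClassOf (c.setdefault k k) w = pvClassOf c w := by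
  by_cases h : w = k
  · subst h; exact PySem.Dict.getD_setdefault_self c w w w
  · simp [pvClassOf, PySem.Dict.getD_eq_get?_getD, PySem.Dict.get?_setdefault_of_ne c k h]

theorem pvRelabel_get? (c : PySem.Dict String String) (ru rv w : String) :
    (pvRelabel c ru rv).get? w = (c.get? w).map (fun x => if x = rv then ru else x) := by
  obtain ⟨l⟩ := c
  induction l with
  | nil => simp [pvRelabel, PySem.Dict.get?, PySem.Dict.items]
  | cons kv rest ih =>
      obtain ⟨k, v⟩ := kv
      by_cases hk : k = w
      · subst hk
        by_cases hv : v = rv <;>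
          simp [pvRelabel, PySem.Dict.get?_mk_cons, hv, List.map_cons]
      · have : (k == w) = false := by simp [hk]
        by_cases hv : v = rv <;>
          simpa [pvRelabel, PySem.Dict.get?_mk_cons, hv, List.map_cons, this] using ih

theorem pvRelabel_keys (c : PySem.Dict String String) (ru rv : String) :
    (pvRelabel c ru rv).keys = c.keys := by
  simp only [pvRelabel, PySem.Dict.keys, List.map_map]
  congr 1
  funext kv
  by_cases hv : kv.2 = rv <;> simp [hv]

theorem pvRelabel_contains (c : PySem.Dict String String) (ru rv w : String) :
    (pvRelabel c ru rv).contains w = c.contains w := by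
  rw [PySem.Dict.contains_eq_isSome_get?, PySem.Dict.contains_eq_isSome_get?, pvRelabel_get?]
  cases c.get? w <;> simp

theorem pvRelabel_classOf (c : PySem.Dict String String) (ru rv w : String)
    (hru : c.contains rv = true) :
    pvClassOf (pvRelabel c ru rv) w = if pvClassOf c w = rv then ru else pvClassOf c w := by
  by_cases hw : c.contains w = true
  · rw [PySem.Dict.contains_eq_isSome_get?] at hw
    obtain ⟨x, hx⟩ := Option.isSome_iff_exists.mp hw
    simp [pvClassOf, PySem.Dict.getD_eq_get?_getD, pvRelabel_get?, hx]
  · have h1 : c.get? w = none := by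
      rw [PySem.Dict.contains_eq_isSome_get?] at hw
      exact Option.not_isSome_iff_eq_none.mp hw
    have h2 : pvClassOf c w = w := by simp [pvClassOf, PySem.Dict.getD_eq_get?_getD, h1]
    have hwrv : w ≠ rv := by
      intro h; rw [h] at hw; exact hw hru
    simp [pvClassOf, PySem.Dict.getD_eq_get?_getD, pvRelabel_get?, h1, h2, hwrv]

def pvVK (c : PySem.Dict String String) : Prop :=
  ∀ w, c.contains w = true → c.contains (pvClassOf c w) = true

theorem pvClassOf_of_not_contains {c : PySem.Dict String String} {w : String}
    (h : c.contains w = false) : pvClassOf c w = w := by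
  have h1 : c.get? w = none := (PySem.Dict.get?_eq_none_iff_contains c w).mpr h
  simp [pvClassOf, PySem.Dict.getD_eq_get?_getD, h1]

theorem pvVK_setdefault {c : PySem.Dict String String} (k : String) (hvk : pvVK c) :
    pvVK (c.setdefault k k) := by
  intro w hw
  rw [pvClassOf_setdefault]
  rw [PySem.Dict.contains_setdefault] at hw ⊢
  rcases Bool.or_eq_true_iff.mp hw with h | h
  · have hk : w = k := by simpa using h
    subst hk
    by_cases hc : c.contains w = true
    · simp [hvk w hc]
    · rw [pvClassOf_of_not_contains (by simpa using hc)]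
      simp
  · simp [hvk w h]

theorem pvNodup_setdefault {c : PySem.Dict String String} (k : String) (hnd : c.keys.Nodup) :
    (c.setdefault k k).keys.Nodup := by
  by_cases h : c.contains k = true
  · rw [PySem.Dict.setdefault_of_contains c k h]; exact hnd
  · rw [PySem.Dict.setdefault_of_not_contains c k (by simpa using h)]
    exact PySem.Dict.nodup_keys_insert c k k hnd

theorem pvCompStep_spec (c : PySem.Dict String String) (u v : String)
    (hnd : c.keys.Nodup) (hvk : pvVK c) :
    (∀ w, pvClassOf (pvCompStep c (u, v)) w =
        if pvClassOf c w = pvClassOf c v then pvClassOf c u else pvClassOf c w) ∧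
    (∀ w, (pvCompStep c (u, v)).contains w = (w == v || w == u || c.contains w)) ∧
    (pvCompStep c (u, v)).keys.Nodup ∧ pvVK (pvCompStep c (u, v)) := by
  have hstep : pvCompStep c (u, v) =
      (if ((c.setdefault u u).setdefault v v).getD u u ≠ ((c.setdefault u u).setdefault v v).getD v v then
        pvRelabel ((c.setdefault u u).setdefault v v) (((c.setdefault u u).setdefault v v).getD u u)
          (((c.setdefault u u).setdefault v v).getD v v)
      else (c.setdefault u u).setdefault v v) := rfl
  set c2 := (c.setdefault u u).setdefault v v with hc2
  have hcls : ∀ w, pvClassOf c2 w = pvClassOf c w := by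
    intro w; rw [hc2, pvClassOf_setdefault, pvClassOf_setdefault]
  have hru : c2.getD u u = pvClassOf c u := by rw [← hcls u]; rfl
  have hrv : c2.getD v v = pvClassOf c v := by rw [← hcls v]; rfl
  have hcont2 : ∀ w, c2.contains w = (w == v || w == u || c.contains w) := by
    intro w
    rw [hc2, PySem.Dict.contains_setdefault, PySem.Dict.contains_setdefault, Bool.or_assoc]
  have hnd2 : c2.keys.Nodup := pvNodup_setdefault v (pvNodup_setdefault u hnd)
  have hvk2 : pvVK c2 := pvVK_setdefault v (pvVK_setdefault u hvk)
  have hvcont : c2.contains v = true := by simp [hcont2]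
  have hucont : c2.contains u = true := by simp [hcont2]
  by_cases hne : pvClassOf c u ≠ pvClassOf c v
  · have hrvmem : c2.contains (pvClassOf c v) = true := by
      have := hvk2 v hvcont
      rwa [hcls v] at this
    rw [hstep]
    rw [if_pos (by rw [hru, hrv]; exact hne)]
    rw [hru, hrv]
    refine ⟨?_, ?_, ?_, ?_⟩
    · intro w
      rw [show pvClassOf (pvRelabel c2 (pvClassOf c u) (pvClassOf c v)) w =
          if pvClassOf c2 w = pvClassOf c v then pvClassOf c u else pvClassOf c2 w from
        pvRelabel_classOf c2 _ _ w hrvmem]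
      rw [hcls w]
    · intro w; rw [pvRelabel_contains, hcont2]
    · have hkeq := pvRelabel_keys c2 (pvClassOf c u) (pvClassOf c v)
      unfold PySem.Dict.keys at hkeq hnd2 ⊢
      rw [hkeq]
      exact hnd2
    · intro w hw
      rw [pvRelabel_contains] at hw
      rw [pvRelabel_contains, pvRelabel_classOf c2 _ _ w hrvmem]
      by_cases h : pvClassOf c2 w = pvClassOf c v
      · rw [if_pos h]
        have := hvk2 u hucont
        rwa [hcls u] at this
      · rw [if_neg h]
        exact hvk2 w hw
  · push_neg at hne
    rw [hstep, if_neg (by rw [hru, hrv]; simpa using hne)]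
    refine ⟨?_, hcont2, hnd2, hvk2⟩
    intro w
    rw [hcls w, hne]
    by_cases h : pvClassOf c w = pvClassOf c v <;> simp [h]

def pvIdOf (sid : PySem.Dict String Int) (w : String) : Int := (sid.get? w).getD (-1)

structure pvInv (sid : PySem.Dict String Int) (p : List Int) (c : PySem.Dict String String) : Prop where
  bnd : pvBnd p
  term : pvTerm p
  idv : ∀ w, sid.contains w = true → pvValid p (pvIdOf sid w)
  mtch : ∀ w1 w2, sid.contains w1 = true → sid.contains w2 = true →
    (pvREq p (pvIdOf sid w1) (pvIdOf sid w2) ↔ pvClassOf c w1 = pvClassOf c w2)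
  nodk : c.keys.Nodup
  vk : pvVK c

theorem pvREq_congr {p q : List Int} (h : ∀ w z, 0 ≤ w → (pvRoot q w z ↔ pvRoot p w z))
    {a b : Int} (ha : 0 ≤ a) (hb : 0 ≤ b) : pvREq q a b ↔ pvREq p a b := by
  constructor <;> rintro ⟨r, h1, h2⟩
  · exact ⟨r, (h a r ha).mp h1, (h b r hb).mp h2⟩
  · exact ⟨r, (h a r ha).mpr h1, (h b r hb).mpr h2⟩

theorem pvFinds2 (sid : PySem.Dict String Int) (p : List Int) (c : PySem.Dict String String)
    (a b : String) (hI : pvInv sid p c)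
    (ha : sid.contains a = true) (hb : sid.contains b = true) :
    pvInv sid (pvFind (pvFind p.length (pvIdOf sid a) p).2.length (pvIdOf sid b)
        (pvFind p.length (pvIdOf sid a) p).2).2 c ∧
    (pvFind (pvFind p.length (pvIdOf sid a) p).2.length (pvIdOf sid b)
        (pvFind p.length (pvIdOf sid a) p).2).2.length = p.length ∧
    pvRoot (pvFind (pvFind p.length (pvIdOf sid a) p).2.length (pvIdOf sid b)
        (pvFind p.length (pvIdOf sid a) p).2).2 (pvIdOf sid a)
      (pvFind p.length (pvIdOf sid a) p).1 ∧
    pvRoot (pvFind (pvFind p.length (pvIdOf sid a) p).2.length (pvIdOf sid b)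
        (pvFind p.length (pvIdOf sid a) p).2).2 (pvIdOf sid b)
      (pvFind (pvFind p.length (pvIdOf sid a) p).2.length (pvIdOf sid b)
        (pvFind p.length (pvIdOf sid a) p).2).1 ∧
    ((pvFind p.length (pvIdOf sid a) p).1 =
        (pvFind (pvFind p.length (pvIdOf sid a) p).2.length (pvIdOf sid b)
          (pvFind p.length (pvIdOf sid a) p).2).1 ↔
      pvClassOf c a = pvClassOf c b) := by
  obtain ⟨hbnd, hterm, hidv, hmtch, hnodk, hvk⟩ := hI
  have hva : pvValid p (pvIdOf sid a) := hidv a ha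
  have hvb : pvValid p (pvIdOf sid b) := hidv b hb
  obtain ⟨ra, ka, hka⟩ : ∃ r k, pvRootN p (pvIdOf sid a) k r := by
    obtain ⟨r, k, hk⟩ := hterm (pvIdOf sid a) hva; exact ⟨r, k, hk⟩
  have hdepa : ka < p.length := pvRootN_depth hbnd hka hva
  obtain ⟨f1a, f2len, f2bnd, f2iff⟩ := pvFind_spec p.length p (pvIdOf sid a) ra ka hbnd hka hdepa hva
  set q1 := (pvFind p.length (pvIdOf sid a) p).2 with hq1
  have hvb1 : pvValid q1 (pvIdOf sid b) := ⟨hvb.1, by rw [f2len]; exact hvb.2⟩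
  obtain ⟨rb, kb, hkb⟩ : ∃ r k, pvRootN q1 (pvIdOf sid b) k r := by
    have : pvRoot p (pvIdOf sid b) ((hterm _ hvb).choose) := (hterm _ hvb).choose_spec
    obtain ⟨k, hk⟩ := (f2iff (pvIdOf sid b) _ hvb.1).mpr this
    exact ⟨_, k, hk⟩
  have hdepb : kb < q1.length := pvRootN_depth f2bnd hkb hvb1
  obtain ⟨g1b, g2len, g2bnd, g2iff⟩ := pvFind_spec q1.length q1 (pvIdOf sid b) rb kb f2bnd hkb hdepb hvb1
  set q2 := (pvFind q1.length (pvIdOf sid b) q1).2 with hq2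
  have hlen : q2.length = p.length := by rw [g2len, f2len]
  have hiff : ∀ w z, 0 ≤ w → (pvRoot q2 w z ↔ pvRoot p w z) := by
    intro w z h0; rw [g2iff w z h0, f2iff w z h0]
  have hterm2 : pvTerm q2 := by
    intro w hw
    have hw' : pvValid p w := ⟨hw.1, by rw [← hlen]; exact hw.2⟩
    obtain ⟨r, hr⟩ := hterm w hw'
    exact ⟨r, (hiff w r hw.1).mpr hr⟩
  have hInv2 : pvInv sid q2 c := by
    refine ⟨g2bnd, hterm2, ?_, ?_, hnodk, hvk⟩
    · intro w hw
      have := hidv w hw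
      exact ⟨this.1, by rw [hlen]; exact this.2⟩
    · intro w1 w2 h1 h2
      rw [pvREq_congr hiff (hidv w1 h1).1 (hidv w2 h2).1]
      exact hmtch w1 w2 h1 h2
  have hrootaq2 : pvRoot q2 (pvIdOf sid a) ra := (hiff _ _ hva.1).mpr ⟨ka, hka⟩
  have hrootbp : pvRoot p (pvIdOf sid b) rb := (f2iff _ _ hvb.1).mp ⟨kb, hkb⟩
  have hrootbq2 : pvRoot q2 (pvIdOf sid b) rb := (hiff _ _ hvb.1).mpr hrootbp
  rw [← hq1, ← hq2] at *
  refine ⟨hInv2, hlen, f1a ▸ hrootaq2, g1b ▸ hrootbq2, ?_⟩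
  rw [f1a, g1b]
  rw [← hmtch a b ha hb]
  constructor
  · intro h; exact ⟨ra, ⟨ka, hka⟩, h ▸ hrootbp⟩
  · rintro ⟨r, h1, h2⟩
    have e1 : r = ra := pvRoot_fun h1 ⟨ka, hka⟩
    have e2 : r = rb := pvRoot_fun h2 hrootbp
    rw [← e1, ← e2]

theorem pvREq_iff_roots_eq {p : List Int} {a b ra rb : Int} (hra : pvRoot p a ra)
    (hrb : pvRoot p b rb) : pvREq p a b ↔ ra = rb := by
  constructor
  · rintro ⟨s, h1, h2⟩
    rw [← pvRoot_fun h1 hra, ← pvRoot_fun h2 hrb]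
  · intro h; exact ⟨ra, hra, h ▸ hrb⟩

theorem pvCollapse_eq_iff {α : Type} [DecidableEq α] (x y a b : α) :
    ((if a = y then x else a) = (if b = y then x else b)) ↔
      (a = b ∨ ((a = x ∨ a = y) ∧ (b = x ∨ b = y))) := by
  by_cases h1 : a = y <;> by_cases h2 : b = y
  · rw [if_pos h1, if_pos h2]
    exact ⟨fun _ => Or.inl (h1.trans h2.symm), fun _ => rfl⟩
  · rw [if_pos h1, if_neg h2]
    constructor
    · intro h; exact Or.inr ⟨Or.inr h1, Or.inl h.symm⟩
    · rintro (h | ⟨-, h | h⟩)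
      · exact absurd (h ▸ h1) h2
      · exact h.symm
      · exact absurd h h2
  · rw [if_neg h1, if_pos h2]
    constructor
    · intro h; exact Or.inr ⟨Or.inl h, Or.inr h2⟩
    · rintro (h | ⟨h | h, -⟩)
      · exact absurd (h.symm ▸ h2) h1
      · exact h
      · exact absurd h h1
  · rw [if_neg h1, if_neg h2]
    constructor
    · intro h; exact Or.inl h
    · rintro (h | ⟨h | h, h' | h'⟩)
      · exact h
      · exact h.trans h'.symm
      · exact absurd h' h2
      · exact absurd h h1
      · exact absurd h h1

theorem pvMerge_inv (sid : PySem.Dict String Int) (q : List Int) (c : PySem.Dict String String)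
    (u v : String) (x y d e : Int) (hI : pvInv sid q c)
    (hrx : pvRoot q (pvIdOf sid u) x) (hry : pvRoot q (pvIdOf sid v) y) (hne : x ≠ y)
    (hu : sid.contains u = true) (hv : sid.contains v = true)
    (hde : (d = x ∧ e = y) ∨ (d = y ∧ e = x)) :
    pvInv sid (q.set e.toNat d) (pvCompStep c (u, v)) := by
  obtain ⟨hbnd, hterm, hidv, hmtch, hnodk, hvk⟩ := hI
  have hvx : pvValid q x := pvRoot_valid hbnd (hidv u hu) hrx
  have hvy : pvValid q y := pvRoot_valid hbnd (hidv v hv) hry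
  have hfx : pvGetP q x = -1 := pvRoot_flat hrx
  have hfy : pvGetP q y = -1 := pvRoot_flat hry
  have hvd : pvValid q d := by rcases hde with ⟨h1, _⟩ | ⟨h1, _⟩ <;> rw [h1] <;> assumption
  have hve : pvValid q e := by rcases hde with ⟨_, h1⟩ | ⟨_, h1⟩ <;> rw [h1] <;> assumption
  have hfd : pvGetP q d = -1 := by rcases hde with ⟨h1, _⟩ | ⟨h1, _⟩ <;> rw [h1] <;> assumption
  have hfe : pvGetP q e = -1 := by rcases hde with ⟨_, h1⟩ | ⟨_, h1⟩ <;> rw [h1] <;> assumption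
  have hned : d ≠ e := by
    rcases hde with ⟨h1, h2⟩ | ⟨h1, h2⟩ <;> rw [h1, h2]
    · exact hne
    · exact hne.symm
  obtain ⟨hbnd', hiff⟩ := pvLink_spec q d e hbnd hvd hve hfd hfe hned
  have hcstep := pvCompStep_spec c u v hnodk hvk
  have hrooteq : ∀ a r z, 0 ≤ a → pvRoot q a r →
      (pvRoot (q.set e.toNat d) a z ↔ z = if r = e then d else r) := by
    intro a r z h0 hr
    rw [hiff a z h0]
    constructor
    · rintro ⟨r', hr', rfl⟩
      rw [pvRoot_fun hr' hr]
    · intro h; exact ⟨r, hr, h⟩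
  refine ⟨hbnd', ?_, ?_, ?_, hcstep.2.2.1, hcstep.2.2.2⟩
  · intro w hw
    have hw' : pvValid q w := by rwa [pvValid, List.length_set] at hw
    obtain ⟨r, hr⟩ := hterm w hw'
    exact ⟨if r = e then d else r, (hrooteq w r _ hw.1 hr).mpr rfl⟩
  · intro w hw
    have := hidv w hw
    exact ⟨this.1, by rw [List.length_set]; exact this.2⟩
  · intro w1 w2 h1 h2
    obtain ⟨r1, hr1⟩ := hterm (pvIdOf sid w1) (hidv w1 h1)
    obtain ⟨r2, hr2⟩ := hterm (pvIdOf sid w2) (hidv w2 h2)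
    have hL : pvREq (q.set e.toNat d) (pvIdOf sid w1) (pvIdOf sid w2) ↔
        (if r1 = e then d else r1) = (if r2 = e then d else r2) := by
      constructor
      · rintro ⟨z, hz1, hz2⟩
        rw [← (hrooteq _ r1 z (hidv w1 h1).1 hr1).mp hz1,
            ← (hrooteq _ r2 z (hidv w2 h2).1 hr2).mp hz2]
      · intro h
        exact ⟨if r1 = e then d else r1, (hrooteq _ r1 _ (hidv w1 h1).1 hr1).mpr rfl,
          (hrooteq _ r2 _ (hidv w2 h2).1 hr2).mpr h⟩
    rw [hL, pvCollapse_eq_iff d e r1 r2]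
    have hxy : ∀ r : Int, (r = d ∨ r = e) ↔ (r = x ∨ r = y) := by
      intro r
      rcases hde with ⟨hd1, he1⟩ | ⟨hd1, he1⟩ <;> rw [hd1, he1] <;> tauto
    rw [hxy r1, hxy r2]
    have hclsu : ∀ w r, sid.contains w = true → pvRoot q (pvIdOf sid w) r →
        ((r = x ↔ pvClassOf c w = pvClassOf c u) ∧ (r = y ↔ pvClassOf c w = pvClassOf c v)) := by
      intro w r hw hr
      constructor
      · rw [← hmtch w u hw hu]
        exact (pvREq_iff_roots_eq hr hrx).symm
      · rw [← hmtch w v hw hv]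
        exact (pvREq_iff_roots_eq hr hry).symm
    obtain ⟨hx1, hy1⟩ := hclsu w1 r1 h1 hr1
    obtain ⟨hx2, hy2⟩ := hclsu w2 r2 h2 hr2
    have hr12 : (r1 = r2) ↔ (pvClassOf c w1 = pvClassOf c w2) := by
      rw [← hmtch w1 w2 h1 h2]
      exact (pvREq_iff_roots_eq hr1 hr2).symm
    rw [hcstep.1 w1, hcstep.1 w2, pvCollapse_eq_iff (pvClassOf c u) (pvClassOf c v)
      (pvClassOf c w1) (pvClassOf c w2)]
    rw [hr12, hx1, hy1, hx2, hy2]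


theorem pvEqStep_inv (sid : PySem.Dict String Int) (q : List Int) (c : PySem.Dict String String)
    (u v : String) (hI : pvInv sid q c) (hcls : pvClassOf c u = pvClassOf c v) :
    pvInv sid q (pvCompStep c (u, v)) := by
  obtain ⟨hbnd, hterm, hidv, hmtch, hnodk, hvk⟩ := hI
  have hspec := pvCompStep_spec c u v hnodk hvk
  have hid : ∀ w, pvClassOf (pvCompStep c (u, v)) w = pvClassOf c w := by
    intro w
    rw [hspec.1 w]
    split_ifs with h
    · exact hcls.trans h.symm
    · rfl
  refine ⟨hbnd, hterm, hidv, ?_, hspec.2.2.1, hspec.2.2.2⟩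
  intro w1 w2 h1 h2
  rw [hid w1, hid w2]
  exact hmtch w1 w2 h1 h2

theorem pvUnionPairs_inv (sid : PySem.Dict String Int) :
    ∀ (ps : List (String × String)) (p rank : List Int) (c : PySem.Dict String String),
      pvInv sid p c →
      (∀ pr ∈ ps, sid.contains pr.1 = true ∧ sid.contains pr.2 = true) →
      pvInv sid (pvUnionPairs sid ps p rank).1 (ps.foldl pvCompStep c) ∧
        (pvUnionPairs sid ps p rank).1.length = p.length := by
  intro ps
  induction ps with
  | nil => intro p rank c hI _; exact ⟨hI, rfl⟩
  | cons pr rest ih =>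
      intro p rank c hI hall
      obtain ⟨u, v⟩ := pr
      have hu : sid.contains u = true := (hall (u, v) (List.mem_cons_self)).1
      have hv : sid.contains v = true := (hall (u, v) (List.mem_cons_self)).2
      have hrest : ∀ pr ∈ rest, sid.contains pr.1 = true ∧ sid.contains pr.2 = true :=
        fun pr h => hall pr (List.mem_cons_of_mem _ h)
      obtain ⟨hI2, hlen2, hrtu, hrtv, hcls⟩ := pvFinds2 sid p c u v hI hu hv
      simp only [pvUnionPairs, List.foldl_cons]
      have hidrw : ∀ w, (sid.get? w).getD (-1) = pvIdOf sid w := fun _ => rfl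
      simp only [hidrw]
      set xp := pvFind p.length (pvIdOf sid u) p with hxp
      set yp := pvFind xp.2.length (pvIdOf sid v) xp.2 with hyp
      by_cases hne : xp.1 ≠ yp.1
      · rw [if_pos hne]
        have hvx : pvValid yp.2 xp.1 := pvRoot_valid hI2.bnd (hI2.idv u hu) hrtu
        have hvy : pvValid yp.2 yp.1 := pvRoot_valid hI2.bnd (hI2.idv v hv) hrtv
        have hmerge1 : pvInv sid (yp.2.set yp.1.toNat xp.1) (pvCompStep c (u, v)) :=
          pvMerge_inv sid yp.2 c u v xp.1 yp.1 xp.1 yp.1 hI2 hrtu hrtv hne hu hv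
            (Or.inl ⟨rfl, rfl⟩)
        have hmerge2 : pvInv sid (yp.2.set xp.1.toNat yp.1) (pvCompStep c (u, v)) :=
          pvMerge_inv sid yp.2 c u v xp.1 yp.1 yp.1 xp.1 hI2 hrtu hrtv hne hu hv
            (Or.inr ⟨rfl, rfl⟩)
        simp only [pvUnion]
        split_ifs with hb1 hb2
        · rw [PySem.List.pySetD_of_nonneg _ _ hvy.1]
          have := ih (yp.2.set yp.1.toNat xp.1) rank (pvCompStep c (u, v)) hmerge1 hrest
          exact ⟨this.1, by rw [this.2, List.length_set, hlen2]⟩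
        · rw [PySem.List.pySetD_of_nonneg _ _ hvx.1]
          have := ih (yp.2.set xp.1.toNat yp.1) rank (pvCompStep c (u, v)) hmerge2 hrest
          exact ⟨this.1, by rw [this.2, List.length_set, hlen2]⟩
        · rw [PySem.List.pySetD_of_nonneg _ _ hvy.1]
          have := ih (yp.2.set yp.1.toNat xp.1)
            (PySem.List.pySetD rank xp.1 (PySem.List.pyGetD rank xp.1 0 + 1))
            (pvCompStep c (u, v)) hmerge1 hrest
          exact ⟨this.1, by rw [this.2, List.length_set, hlen2]⟩
      · rw [if_neg hne]
        push_neg at hne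
        have hcl : pvClassOf c u = pvClassOf c v := hcls.mp hne
        have := ih yp.2 rank (pvCompStep c (u, v))
          (pvEqStep_inv sid yp.2 c u v hI2 hcl) hrest
        exact ⟨this.1, by rw [this.2, hlen2]⟩

def pvSidOk (sid : PySem.Dict String Int) (uid : Int) : Prop :=
  0 ≤ uid ∧ (∀ w i, sid.get? w = some i → 0 ≤ i ∧ i < uid) ∧
    (∀ w1 w2 i, sid.get? w1 = some i → sid.get? w2 = some i → w1 = w2)

theorem pvSidOk_insert {sid : PySem.Dict String Int} {uid : Int} (w : String)
    (h : pvSidOk sid uid) (_hnc : sid.contains w = false) :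
    pvSidOk (sid.insert w uid) (uid + 1) := by
  obtain ⟨h0, hbd, hinj⟩ := h
  refine ⟨by omega, ?_, ?_⟩
  · intro w' i hi
    rw [PySem.Dict.get?_insert] at hi
    split_ifs at hi with hw
    · cases hi; omega
    · have := hbd w' i hi; omega
  · intro w1 w2 i h1 h2
    rw [PySem.Dict.get?_insert] at h1 h2
    split_ifs at h1 h2 with e1 e2 e2
    · rw [e1, e2]
    · cases h1; have := hbd w2 uid h2; omega
    · cases h2; have := hbd w1 uid h1; omega
    · exact hinj w1 w2 i h1 h2

theorem pvBuildIds_ok : ∀ (ps : List (String × String)) (sid : PySem.Dict String Int)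
    (ids : PySem.Dict Int String) (uid : Int), pvSidOk sid uid →
    pvSidOk (pvBuildIds ps sid ids uid).1 (pvBuildIds ps sid ids uid).2.2 ∧
    (∀ w, (pvBuildIds ps sid ids uid).1.contains w =
      (sid.contains w || ps.any (fun pr => pr.1 == w || pr.2 == w))) := by
  intro ps
  induction ps with
  | nil => intro sid ids uid h; exact ⟨h, fun w => by simp [pvBuildIds]⟩
  | cons pr rest ih =>
      intro sid ids uid h
      obtain ⟨u, v⟩ := pr
      simp only [pvBuildIds]
      by_cases hcu : sid.contains u = true
      · rw [if_pos hcu]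
        by_cases hcv : sid.contains v = true
        · rw [if_pos hcv]
          obtain ⟨hok, hcont⟩ := ih sid ids uid h
          refine ⟨hok, fun w => ?_⟩
          rw [hcont w]
          apply Bool.eq_iff_iff.mpr
          simp only [Bool.or_eq_true, beq_iff_eq, List.any_cons]
          have hcu' : u = w → sid.contains w = true := fun hh => hh ▸ hcu
          have hcv' : v = w → sid.contains w = true := fun hh => hh ▸ hcv
          tauto
        · rw [if_neg hcv]
          obtain ⟨hok, hcont⟩ := ih (sid.insert v uid) (ids.insert uid v) (uid + 1)
            (pvSidOk_insert v h (by simpa using hcv))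
          refine ⟨hok, fun w => ?_⟩
          rw [hcont w]
          apply Bool.eq_iff_iff.mpr
          simp only [PySem.Dict.contains_insert, Bool.or_eq_true, beq_iff_eq, List.any_cons]
          have hcu' : u = w → sid.contains w = true := fun hh => hh ▸ hcu
          have ec : w = v ↔ v = w := eq_comm
          tauto
      · rw [if_neg hcu]
        have h1 := pvSidOk_insert u h (by simpa using hcu)
        by_cases hcv : (sid.insert u uid).contains v = true
        · rw [if_pos hcv]
          obtain ⟨hok, hcont⟩ := ih (sid.insert u uid) (ids.insert uid u) (uid + 1) h1
          refine ⟨hok, fun w => ?_⟩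
          rw [hcont w]
          apply Bool.eq_iff_iff.mpr
          simp only [PySem.Dict.contains_insert, Bool.or_eq_true, beq_iff_eq, List.any_cons]
          rw [PySem.Dict.contains_insert] at hcv
          simp only [Bool.or_eq_true, beq_iff_eq] at hcv
          have hv' : v = w → (w = u ∨ sid.contains w = true) := by
            intro hh
            subst hh
            exact hcv
          have ec : w = u ↔ u = w := eq_comm
          tauto
        · rw [if_neg hcv]
          obtain ⟨hok, hcont⟩ := ih ((sid.insert u uid).insert v (uid + 1))
            ((ids.insert uid u).insert (uid + 1) v) (uid + 1 + 1)
            (pvSidOk_insert v h1 (by simpa using hcv))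
          refine ⟨hok, fun w => ?_⟩
          rw [hcont w]
          apply Bool.eq_iff_iff.mpr
          simp only [PySem.Dict.contains_insert, Bool.or_eq_true, beq_iff_eq, List.any_cons]
          have ec1 : w = v ↔ v = w := eq_comm
          have ec2 : w = u ↔ u = w := eq_comm
          tauto
theorem pvInit_inv (sid : PySem.Dict String Int) (uid : Int) (h : pvSidOk sid uid) :
    pvInv sid (List.replicate uid.toNat (-1)) PySem.Dict.empty := by
  obtain ⟨h0, hbd, hinj⟩ := h
  have hget : ∀ u, pvGetP (List.replicate uid.toNat (-1 : Int)) u = -1 := by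
    intro u
    simp only [pvGetP, List.getD, List.getElem?_replicate]
    split_ifs <;> simp
  have hroot : ∀ u r, pvRoot (List.replicate uid.toNat (-1 : Int)) u r ↔ r = u := by
    intro u r
    constructor
    · rintro ⟨k, hk⟩
      cases hk with
      | self => rfl
      | step _ _ _ hne => exact absurd (hget _) hne
    · rintro rfl
      exact ⟨0, pvRootN.self _ (hget _)⟩
  have hsome : ∀ w, sid.contains w = true → ∃ i, sid.get? w = some i := by
    intro w hw
    rw [PySem.Dict.contains_eq_isSome_get?] at hw
    exact Option.isSome_iff_exists.mp hw
  refine ⟨fun u _ => Or.inl (hget u), fun u _ => ⟨u, (hroot u u).mpr rfl⟩, ?_, ?_, by simp, ?_⟩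
  · intro w hw
    obtain ⟨i, hi⟩ := hsome w hw
    have := hbd w i hi
    rw [pvIdOf, hi]
    exact ⟨this.1, by simp [Option.getD]; omega⟩
  · intro w1 w2 h1 h2
    obtain ⟨i1, hi1⟩ := hsome w1 h1
    obtain ⟨i2, hi2⟩ := hsome w2 h2
    have hcls : ∀ w, pvClassOf PySem.Dict.empty w = w := by
      intro w; simp [pvClassOf]
    rw [hcls w1, hcls w2, pvIdOf, pvIdOf, hi1, hi2]
    simp only [Option.getD_some]
    constructor
    · rintro ⟨r, hr1, hr2⟩
      rw [hroot] at hr1 hr2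
      exact hinj w1 w2 r (hi1.trans (by rw [hr1])) (hi2.trans (by rw [hr2]))
    · rintro rfl
      rw [hi1] at hi2
      cases hi2
      exact ⟨i1, (hroot _ _).mpr rfl, (hroot _ _).mpr rfl⟩
  · intro w hw
    simp at hw

theorem pvFold_contains : ∀ (ps : List (String × String)) (c : PySem.Dict String String),
    c.keys.Nodup → pvVK c →
    ∀ w, (ps.foldl pvCompStep c).contains w =
      (c.contains w || ps.any (fun pr => pr.1 == w || pr.2 == w)) := by
  intro ps
  induction ps with
  | nil => intro c _ _ w; simp
  | cons pr rest ih =>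
      intro c hnd hvk w
      obtain ⟨u, v⟩ := pr
      have hspec := pvCompStep_spec c u v hnd hvk
      rw [List.foldl_cons, ih (pvCompStep c (u, v)) hspec.2.2.1 hspec.2.2.2 w, hspec.2.1 w]
      apply Bool.eq_iff_iff.mpr
      simp only [Bool.or_eq_true, beq_iff_eq, List.any_cons]
      have ec1 : w = v ↔ v = w := eq_comm
      have ec2 : w = u ↔ u = w := eq_comm
      tauto

theorem pvCheck_eq (sid : PySem.Dict String Int) (c : PySem.Dict String String)
    (w1 w2 : List String) : ∀ (idxs : List Int) (p : List Int), pvInv sid p c →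
    (∀ w, c.contains w = sid.contains w) →
    pvCheckA sid p idxs w1 w2 = pvCheckB c idxs w1 w2 := by
  intro idxs
  induction idxs with
  | nil => intro p _ _; rfl
  | cons i rest ih =>
      intro p hI hkeys
      simp only [pvCheckA, pvCheckB]
      by_cases hab : PySem.List.pyGetD w1 i "" = PySem.List.pyGetD w2 i ""
      · rw [if_pos hab, if_pos hab]
        exact ih p hI hkeys
      · rw [if_neg hab, if_neg hab]
        set a := PySem.List.pyGetD w1 i "" with ha
        set b := PySem.List.pyGetD w2 i "" with hb
        rw [hkeys a, hkeys b]
        by_cases hm : (!sid.contains a || !sid.contains b) = true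
        · rw [if_pos hm, if_pos hm]
        · rw [if_neg hm, if_neg hm]
          simp only [Bool.or_eq_true, Bool.not_eq_eq_eq_not, Bool.not_true] at hm
          push_neg at hm
          have hca : sid.contains a = true := by
            cases hca : sid.contains a
            · exact absurd hca hm.1
            · rfl
          have hcb : sid.contains b = true := by
            cases hcb : sid.contains b
            · exact absurd hcb hm.2
            · rfl
          obtain ⟨hI2, hlen2, hrta, hrtb, hcls⟩ := pvFinds2 sid p c a b hI hca hcb
          have hidrw : ∀ w, (sid.get? w).getD (-1) = pvIdOf sid w := fun _ => rfl
          simp only [hidrw]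
          have hclseq : (pvClassOf c a = pvClassOf c b) ↔ (c.getD a a = c.getD b b) := Iff.rfl
          by_cases hne : (pvFind p.length (pvIdOf sid a) p).1 =
              (pvFind (pvFind p.length (pvIdOf sid a) p).2.length (pvIdOf sid b)
                (pvFind p.length (pvIdOf sid a) p).2).1
          · rw [if_neg (by simpa using hne), if_neg (by
              show ¬ c.getD a a ≠ c.getD b b
              simp only [ne_eq, not_not]
              exact hclseq.mp (hcls.mp hne))]
            exact ih _ hI2 hkeys
          · rw [if_pos (by simpa using hne), if_pos (by
              show c.getD a a ≠ c.getD b b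
              intro hh
              exact hne (hcls.mpr (hclseq.mpr hh)))]

theorem pvMain (n m p : Int) (word1 word2 : List String) (pairs : List (String × String)) :
    IdenticalSentences n m p word1 word2 pairs = IdenticalSentences_alt n m p word1 word2 pairs := by
  by_cases h : n ≠ m
  · simp only [IdenticalSentences, IdenticalSentences_alt, if_pos h]
  · simp only [IdenticalSentences, IdenticalSentences_alt, if_neg h]
    have hok0 : pvSidOk PySem.Dict.empty 0 := by
      refine ⟨le_refl 0, ?_, ?_⟩
      · intro w i hi; simp at hi
      · intro w1 w2 i h1 h2; simp at h1
    have hok := pvBuildIds_ok pairs PySem.Dict.empty PySem.Dict.empty 0 hok0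
    have hinit := pvInit_inv (pvBuildIds pairs PySem.Dict.empty PySem.Dict.empty 0).1
      (pvBuildIds pairs PySem.Dict.empty PySem.Dict.empty 0).2.2 hok.1
    have hpairs : ∀ pr ∈ pairs,
        (pvBuildIds pairs PySem.Dict.empty PySem.Dict.empty 0).1.contains pr.1 = true ∧
        (pvBuildIds pairs PySem.Dict.empty PySem.Dict.empty 0).1.contains pr.2 = true := by
      intro pr hpr
      constructor <;> rw [hok.2] <;>
        simp only [PySem.Dict.contains_empty, Bool.false_or] <;>
        exact List.any_eq_true.mpr ⟨pr, hpr, by simp⟩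
    have hloop := pvUnionPairs_inv (pvBuildIds pairs PySem.Dict.empty PySem.Dict.empty 0).1
      pairs (List.replicate (pvBuildIds pairs PySem.Dict.empty PySem.Dict.empty 0).2.2.toNat (-1))
      (List.replicate (pvBuildIds pairs PySem.Dict.empty PySem.Dict.empty 0).2.2.toNat 0)
      PySem.Dict.empty hinit hpairs
    have hkeys : ∀ w, (pairs.foldl pvCompStep PySem.Dict.empty).contains w =
        (pvBuildIds pairs PySem.Dict.empty PySem.Dict.empty 0).1.contains w := by
      intro w
      rw [pvFold_contains pairs PySem.Dict.empty (by simp [PySem.Dict.keys, PySem.Dict.empty])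
        (by intro w' hw'; simp at hw'), hok.2 w]
      rfl
    exact pvCheck_eq (pvBuildIds pairs PySem.Dict.empty PySem.Dict.empty 0).1
      (pairs.foldl pvCompStep PySem.Dict.empty) word1 word2 (PySem.List.pyRange 0 n 1) _
      hloop.1 hkeys

-- ===== VERDICT (by name: the statement is the Claim_ definition above) =====
theorem IdenticalSentences_spec : Claim_equal_IdenticalSentences := by
  intro n m p word1 word2 pairs _ _
  unfold Spec_IdenticalSentences
  exact pvMain n m p word1 word2 pairs
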